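-- pv_equiv track=rewrite | github.com/Jeff-Stoyanoff/Algo-Practice | codewars_6.py | high
-- ===== SOURCE A (Python) =====
-- def high(x):
--     x_array = [word for word in x.split()]
--     alpha = "abcdefghijklmnopqrstuvwxyz"
--     alpha_dict = {char: index + 1 for index, char in enumerate(alpha)}
--     letter_count = 1
--     word_count = 0
--     count_array = []
--
--     for i in x_array:
--         letter_count = 1
--         for letter in i:
--             letter_count += alpha_dict.get(letter, 0)
--         word_count += letter_count
--         count_array.append(word_count)
--         word_count = 0
--
--     max_num = max(count_array)
--     longest_word = count_array.index(max_num)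
--     final_word = x_array[longest_word]
--
--     return final_word
-- ===== SOURCE B (Python) =====
-- def high(x):
--     # One streaming pass over the characters: build the current word and its
--     # score on the fly, keep the best-so-far; no split(), no score list.
--     best_word = None
--     best_score = -1
--     cur = []
--     cur_score = 0
--     for c in x:
--         if c.isspace():
--             if cur:
--                 if cur_score > best_score:
--                     best_word = ''.join(cur)
--                     best_score = cur_score
--                 cur = []
--                 cur_score = 0
--         else:
--             cur.append(c)
--             if 'a' <= c <= 'z':
--                 cur_score += ord(c) - 96
--     if cur and cur_score > best_score:
--         best_word = ''.join(cur)
--     if best_word is None: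
--         raise ValueError("high() arg contains no words")
--     return best_word
-- ===== Notes on version B (the rewrite author's own statement) =====
-- stated objective: alternative
-- what changed: B replaces A's split-into-words / build-a-parallel-score-list / max() / .index() / index-back pipeline by a single streaming scan over the raw characters that assembles the current word and its score in-place and keeps the best-so-far word (strict > keeps the first maximum, matching A's .index(max(...))).
import Mathlib
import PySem

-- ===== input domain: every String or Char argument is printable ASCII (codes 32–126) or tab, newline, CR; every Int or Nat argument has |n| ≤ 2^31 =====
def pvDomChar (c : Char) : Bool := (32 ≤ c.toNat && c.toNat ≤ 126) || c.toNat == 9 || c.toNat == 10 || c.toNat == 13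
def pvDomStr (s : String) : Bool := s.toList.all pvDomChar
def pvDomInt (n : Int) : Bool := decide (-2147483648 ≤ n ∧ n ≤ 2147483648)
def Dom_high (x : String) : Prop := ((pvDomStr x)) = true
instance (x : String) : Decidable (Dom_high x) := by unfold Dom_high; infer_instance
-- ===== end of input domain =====

-- B replaces A's split / score-list / max / .index pipeline by one streaming scan over the
-- characters keeping the best word so far; objective: alternative (no speed claim).

-- ===== PORT A =====
-- alpha_dict = {char: index+1 for index, char in enumerate(alpha)}
def highAlphaDict : PySem.Dict Char Int :=
  (PySem.List.enumerate "abcdefghijklmnopqrstuvwxyz".toList 0).foldl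
    (fun d p => d.insert p.2 (p.1 + 1)) (PySem.Dict.mk [])

def high (x : String) : String :=
  let xArray := PySem.Str.split₀ x
  let countArray : List Int :=
    xArray.foldl
      (fun countArray i =>
        let letterCount := i.toList.foldl (fun lc letter => lc + highAlphaDict.getD letter 0) 1
        let wordCount := 0 + letterCount
        countArray ++ [wordCount]) []
  match PySem.List.max? countArray (fun v => v) with
  | none => ""          -- Python: max([]) raises ValueError (excluded by Pre_high)
  | some maxNum =>
    match PySem.List.index? countArray maxNum with
    | none => ""
    | some longestWord => (PySem.List.pyGet? xArray (longestWord : Int)).getD ""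

-- ===== PORT B =====
-- the body of B's `for c in x` loop: state = (best_word, best_score, cur, cur_score)
def bStep (st : Option String × Int × List Char × Int) (c : Char) :
    Option String × Int × List Char × Int :=
  match st with
  | (bw, bs, cur, cs) =>
    if PySem.Chars.isspace c then
      if cur.isEmpty then (bw, bs, cur, cs)
      else if bs < cs then (some (String.ofList cur), cs, [], 0)
      else (bw, bs, [], 0)
    else
      (bw, bs, cur ++ [c], cs + (if 'a' ≤ c ∧ c ≤ 'z' then (c.toNat : Int) - 96 else 0))

def high_alt (x : String) : String :=
  match x.toList.foldl bStep (none, -1, [], 0) with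
  | (bw, bs, cur, cs) =>
    (if ¬ cur.isEmpty ∧ bs < cs then some (String.ofList cur) else bw).getD ""
    -- Python: raises ValueError when best_word is None (no words; excluded by Pre_high)

-- ===== PRECONDITION & SPEC =====
-- Pre_ excludes inputs with no words (x.split() == []): there BOTH programs raise ValueError.
def Pre_high (x : String) : Prop := PySem.Str.split₀ x ≠ []
instance (x : String) : Decidable (Pre_high x) := by unfold Pre_high; infer_instance
def pvWitness_high : String := "man i need a taxi up to ubud"
def Spec_high (x : String) (out : String) : Prop := out = high_alt x
instance (x : String) (out : String) : Decidable (Spec_high x out) := by unfold Spec_high; infer_instance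

-- ===== CLAIM =====
def Claim_equal_high : Prop := ∀ (x : String), Dom_high x → Pre_high x → Spec_high x (high x)

-- ===== LEMMAS AND PROOFS =====

-- per-char value both programs assign to a character
def chVal (c : Char) : Int := if 'a' ≤ c ∧ c ≤ 'z' then (c.toNat : Int) - 96 else 0

def score (cs : List Char) : Int := (cs.map chVal).sum
def scoreS (w : String) : Int := score w.toList

-- "first maximum" recursion used to characterise both sides
def amax {α : Type} (f : α → Int) : List α → Option α
  | [] => none
  | w :: ws => some ((amax f ws).elim w (fun m => if f w < f m then m else w))

lemma amax_eq_none_iff {α : Type} (f : α → Int) (ws : List α) :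
    amax f ws = none ↔ ws = [] := by
  cases ws <;> simp [amax]

lemma amax_cons_cons {α : Type} (f : α → Int) (w u : α) (r : List α) :
    amax f (w :: u :: r) = amax f ((if f w < f u then u else w) :: r) := by
  simp only [amax]
  rcases amax f r with _ | m <;>
    by_cases h1 : f w < f u <;>
    simp [Option.elim, h1] <;>
    split_ifs <;> first | rfl | omega

lemma max?_eq_amax {α : Type} (f : α → Int) (t : List α) : ∀ w : α,
    PySem.List.max? (w :: t) f = amax f (w :: t) := by
  induction t with
  | nil => intro w; rfl
  | cons u r ih =>
    intro w
    have hstep : PySem.List.max? (w :: u :: r) f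
        = PySem.List.max? ((if f w < f u then u else w) :: r) f := by
      simp only [PySem.List.max?, List.foldl_cons]
      congr 1
      split_ifs <;> rfl
    rw [hstep, ih, ← amax_cons_cons]

lemma amax_map {α β : Type} (g : α → Int) (h : β → α) (ws : List β) :
    amax (fun v => v) (ws.map (fun w => g (h w))) = (amax (fun w => g (h w)) ws).map (fun w => g (h w)) := by
  induction ws with
  | nil => simp [amax]
  | cons w t ih =>
    simp only [List.map_cons, amax, ih]
    rcases amax (fun w => g (h w)) t with _ | m <;> simp [Option.elim] <;> split <;> simp

lemma amax_map' {α β : Type} (f : α → Int) (g : β → α) (ws : List β) :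
    amax f (ws.map g) = (amax (fun w => f (g w)) ws).map g := by
  induction ws with
  | nil => simp [amax]
  | cons w t ih =>
    simp only [List.map_cons, amax, ih]
    rcases amax (fun w => f (g w)) t with _ | m <;> simp [Option.elim] <;> split <;> simp

lemma amax_shift {α : Type} (f : α → Int) (ws : List α) :
    amax (fun w => 1 + f w) ws = amax f ws := by
  induction ws with
  | nil => rfl
  | cons w t ih =>
    simp only [amax, ih]
    rcases amax f t with _ | m
    · rfl
    · simp only [Option.elim, Option.some.injEq]
      by_cases h : f w < f m
      · rw [if_pos h, if_pos (show (1:Int) + f w < 1 + f m by omega)]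
      · rw [if_neg h, if_neg (show ¬ ((1:Int) + f w < 1 + f m) by omega)]

lemma amax_mem {α : Type} (f : α → Int) (ws : List α) (m : α)
    (hm : amax f ws = some m) : m ∈ ws := by
  induction ws generalizing m with
  | nil => simp [amax] at hm
  | cons w t ih =>
    simp only [amax, Option.some.injEq] at hm
    rcases ht : amax f t with _ | mt <;> rw [ht] at hm <;> simp [Option.elim] at hm
    · subst hm; simp
    · split_ifs at hm <;> subst hm
      · exact List.mem_cons_of_mem _ (ih mt ht)
      · simp

-- the dictionary A builds assigns chVal to every character
lemma highAlphaDict_getD (c : Char) : highAlphaDict.getD c 0 = chVal c := by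
  have hd : highAlphaDict = PySem.Dict.mk
      [('a',1),('b',2),('c',3),('d',4),('e',5),('f',6),('g',7),('h',8),('i',9),('j',10),('k',11),('l',12),('m',13),('n',14),('o',15),('p',16),('q',17),('r',18),('s',19),('t',20),('u',21),('v',22),('w',23),('x',24),('y',25),('z',26)] := by
    rfl
  rw [hd]
  by_cases h : 'a' ≤ c ∧ c ≤ 'z'
  · have hlo : 97 ≤ c.toNat := UInt32.le_iff_toNat_le.mp (Char.le_def.mp h.1)
    have hhi : c.toNat ≤ 122 := UInt32.le_iff_toNat_le.mp (Char.le_def.mp h.2)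
    interval_cases hc : c.toNat <;>
      first
      | (have e : c = 'a' := Char.ext (UInt32.toNat_inj.mp hc); subst e; decide)
      | (have e : c = 'b' := Char.ext (UInt32.toNat_inj.mp hc); subst e; decide)
      | (have e : c = 'c' := Char.ext (UInt32.toNat_inj.mp hc); subst e; decide)
      | (have e : c = 'd' := Char.ext (UInt32.toNat_inj.mp hc); subst e; decide)
      | (have e : c = 'e' := Char.ext (UInt32.toNat_inj.mp hc); subst e; decide)
      | (have e : c = 'f' := Char.ext (UInt32.toNat_inj.mp hc); subst e; decide)
      | (have e : c = 'g' := Char.ext (UInt32.toNat_inj.mp hc); subst e; decide)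
      | (have e : c = 'h' := Char.ext (UInt32.toNat_inj.mp hc); subst e; decide)
      | (have e : c = 'i' := Char.ext (UInt32.toNat_inj.mp hc); subst e; decide)
      | (have e : c = 'j' := Char.ext (UInt32.toNat_inj.mp hc); subst e; decide)
      | (have e : c = 'k' := Char.ext (UInt32.toNat_inj.mp hc); subst e; decide)
      | (have e : c = 'l' := Char.ext (UInt32.toNat_inj.mp hc); subst e; decide)
      | (have e : c = 'm' := Char.ext (UInt32.toNat_inj.mp hc); subst e; decide)
      | (have e : c = 'n' := Char.ext (UInt32.toNat_inj.mp hc); subst e; decide)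
      | (have e : c = 'o' := Char.ext (UInt32.toNat_inj.mp hc); subst e; decide)
      | (have e : c = 'p' := Char.ext (UInt32.toNat_inj.mp hc); subst e; decide)
      | (have e : c = 'q' := Char.ext (UInt32.toNat_inj.mp hc); subst e; decide)
      | (have e : c = 'r' := Char.ext (UInt32.toNat_inj.mp hc); subst e; decide)
      | (have e : c = 's' := Char.ext (UInt32.toNat_inj.mp hc); subst e; decide)
      | (have e : c = 't' := Char.ext (UInt32.toNat_inj.mp hc); subst e; decide)
      | (have e : c = 'u' := Char.ext (UInt32.toNat_inj.mp hc); subst e; decide)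
      | (have e : c = 'v' := Char.ext (UInt32.toNat_inj.mp hc); subst e; decide)
      | (have e : c = 'w' := Char.ext (UInt32.toNat_inj.mp hc); subst e; decide)
      | (have e : c = 'x' := Char.ext (UInt32.toNat_inj.mp hc); subst e; decide)
      | (have e : c = 'y' := Char.ext (UInt32.toNat_inj.mp hc); subst e; decide)
      | (have e : c = 'z' := Char.ext (UInt32.toNat_inj.mp hc); subst e; decide)
  · have hnc : (PySem.Dict.mk
        [('a',(1:Int)),('b',2),('c',3),('d',4),('e',5),('f',6),('g',7),('h',8),('i',9),('j',10),('k',11),('l',12),('m',13),('n',14),('o',15),('p',16),('q',17),('r',18),('s',19),('t',20),('u',21),('v',22),('w',23),('x',24),('y',25),('z',26)]).contains c = false := by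
      rw [PySem.Dict.contains_eq_decide_mem_keys]
      simp only [PySem.Dict.keys_mk, decide_eq_false_iff_not, List.map_cons, List.map_nil]
      intro hm
      simp only [List.mem_cons, List.not_mem_nil, or_false] at hm
      rcases hm with rfl|rfl|rfl|rfl|rfl|rfl|rfl|rfl|rfl|rfl|rfl|rfl|rfl|rfl|rfl|rfl|rfl|rfl|rfl|rfl|rfl|rfl|rfl|rfl|rfl|rfl <;> exact h (by decide)
    rw [PySem.Dict.getD_of_not_contains _ 0 hnc]
    unfold chVal
    rw [if_neg h]

lemma letter_fold (cs : List Char) (a : Int) :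
    cs.foldl (fun lc letter => lc + highAlphaDict.getD letter 0) a = a + score cs := by
  induction cs generalizing a with
  | nil => simp [score]
  | cons c t ih =>
    rw [List.foldl_cons, ih, highAlphaDict_getD]
    simp only [score, List.map_cons, List.sum_cons]
    ring

lemma first_index_max {α : Type} (g : α → Int) (ws : List α) (m : α) (k : Nat)
    (hm : amax g ws = some m)
    (hk : PySem.List.index? (ws.map g) (g m) = some k) :
    ws[k]? = some m := by
  induction ws generalizing m k with
  | nil => simp [amax] at hm
  | cons w t ih =>
    simp only [amax, Option.some.injEq] at hm
    rcases ht : amax g t with _ | mt <;> rw [ht] at hm <;> simp only [Option.elim] at hm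
    · subst hm
      rw [List.map_cons, PySem.List.index?_cons_self] at hk
      simp only [Option.some.injEq] at hk
      subst hk; simp
    · by_cases hlt : g w < g mt
      · rw [if_pos hlt] at hm
        subst hm
        have hne : g w ≠ g mt := by omega
        rw [List.map_cons, PySem.List.index?_cons_of_ne _ hne] at hk
        rcases hk' : PySem.List.index? (t.map g) (g mt) with _ | k' <;> rw [hk'] at hk <;> simp at hk
        subst hk
        simpa using ih mt k' ht hk'
      · rw [if_neg hlt] at hm
        subst hm
        rw [List.map_cons, PySem.List.index?_cons_self] at hk
        simp only [Option.some.injEq] at hk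
        subst hk; simp

-- ===== A-side characterisation =====
lemma highA_char (x : String) (w : String) (t : List String)
    (hws : PySem.Str.split₀ x = w :: t) :
    high x = ((amax scoreS (w :: t)).map (fun s => s)).getD "" := by
  unfold high
  rw [hws]
  simp only []
  have hcount :
      (w :: t).foldl (fun countArray i =>
        countArray ++ [0 + i.toList.foldl (fun lc letter => lc + highAlphaDict.getD letter 0) 1]) []
      = (w :: t).map (fun i => 1 + scoreS i) := by
    rw [PySem.List.foldl_append_singleton_eq_map]
    apply List.map_congr_left
    intro i _
    rw [letter_fold]
    unfold scoreS
    ring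
  rw [hcount]
  obtain ⟨m, hm⟩ : ∃ m, amax scoreS (w :: t) = some m := by
    rcases h : amax scoreS (w :: t) with _ | m
    · exact absurd ((amax_eq_none_iff _ _).1 h) (by simp)
    · exact ⟨m, rfl⟩
  have hG : amax (fun i => 1 + scoreS i) (w :: t) = some m := by
    rw [amax_shift]; exact hm
  have hmap : (w :: t).map (fun i => 1 + scoreS i)
      = (1 + scoreS w) :: t.map (fun i => 1 + scoreS i) := by simp
  have hmax : PySem.List.max? ((w :: t).map (fun i => 1 + scoreS i)) (fun v => v)
      = some (1 + scoreS m) := by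
    rw [hmap, max?_eq_amax, ← hmap]
    rw [show ((w :: t).map (fun i => 1 + scoreS i))
        = ((w :: t).map (fun i => (fun v => v) ((fun j => 1 + scoreS j) i))) from rfl]
    rw [amax_map (fun v => v) (fun j => 1 + scoreS j) (w :: t)]
    simp only [hG]
    rfl
  have hmem : (1 + scoreS m) ∈ (w :: t).map (fun i => 1 + scoreS i) :=
    List.mem_map_of_mem (amax_mem _ _ _ hm)
  obtain ⟨k, hk⟩ : ∃ k, PySem.List.index? ((w :: t).map (fun i => 1 + scoreS i)) (1 + scoreS m) = some k := by
    rcases h : PySem.List.index? ((w :: t).map (fun i => 1 + scoreS i)) (1 + scoreS m) with _ | k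
    · rw [← Option.not_isSome_iff_eq_none, PySem.List.index?_isSome_iff] at h
      exact absurd hmem h
    · exact ⟨k, rfl⟩
  have hget : (w :: t)[k]? = some m := first_index_max (fun i => 1 + scoreS i) (w :: t) m k hG hk
  simp only [hmax, hk, PySem.List.pyGet?_natCast, hget, Option.getD_some, hm, Option.map_some]

-- ===== B-side characterisation =====
def finish (st : Option String × Int × List Char × Int) : Option String :=
  match st with
  | (bw, bs, cur, cs) => if ¬ cur.isEmpty ∧ bs < cs then some (String.ofList cur) else bw

def chooseSt (st : Option String × Int) (ws : List (List Char)) : Option String × Int :=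
  ws.foldl (fun st w => if st.2 < score w then (some (String.ofList w), score w) else st) st

lemma go_acc (cs : List Char) : ∀ (cur : List Char) (acc : List (List Char)),
    PySem.Chars.split₀.go cs cur acc = acc.reverse ++ PySem.Chars.split₀.go cs cur [] := by
  induction cs with
  | nil =>
    intro cur acc
    simp only [PySem.Chars.split₀.go]
    split_ifs <;> simp
  | cons c rest ih =>
    intro cur acc
    simp only [PySem.Chars.split₀.go]
    split_ifs with h1 h2
    · exact ih [] acc
    · rw [ih [] (cur.reverse :: acc), ih [] [cur.reverse]]
      simp
    · exact ih (c :: cur) acc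

lemma fold_go (cs : List Char) : ∀ (bw : Option String) (bs : Int) (cur : List Char),
    finish (cs.foldl bStep (bw, bs, cur, score cur))
    = (chooseSt (bw, bs) (PySem.Chars.split₀.go cs cur.reverse [])).1 := by
  induction cs with
  | nil =>
    intro bw bs cur
    simp only [List.foldl_nil, PySem.Chars.split₀.go, List.isEmpty_reverse, List.reverse_reverse]
    by_cases hcur : cur.isEmpty
    · simp [finish, chooseSt, hcur]
    · by_cases hbs : bs < score cur <;>
        simp [finish, chooseSt, hcur, hbs]
  | cons c rest ih =>
    intro bw bs cur
    simp only [List.foldl_cons, bStep, PySem.Chars.split₀.go, List.isEmpty_reverse,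
      List.reverse_reverse]
    by_cases hsp : PySem.Chars.isspace c
    · rw [if_pos hsp, if_pos hsp]
      by_cases hcur : cur.isEmpty
      · have hc : cur = [] := List.isEmpty_iff.mp hcur
        rw [if_pos hcur, if_pos hcur]
        subst hc
        exact ih bw bs []
      · rw [if_neg hcur, if_neg hcur]
        rw [go_acc rest [] [cur]]
        simp only [List.reverse_cons, List.reverse_nil, List.nil_append]
        rw [List.singleton_append]
        have hch : chooseSt (bw, bs) (cur :: PySem.Chars.split₀.go rest [] [])
            = chooseSt (if bs < score cur then (some (String.ofList cur), score cur) else (bw, bs))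
                (PySem.Chars.split₀.go rest [] []) := by
          simp only [chooseSt, List.foldl_cons]
        rw [hch]
        by_cases hbs : bs < score cur
        · rw [if_pos hbs, if_pos hbs]
          have := ih (some (String.ofList cur)) (score cur) []
          simpa [score] using this
        · rw [if_neg hbs, if_neg hbs]
          have := ih bw bs []
          simpa [score] using this
    · rw [if_neg hsp, if_neg hsp]
      have hs : score cur + (if 'a' ≤ c ∧ c ≤ 'z' then (c.toNat : Int) - 96 else 0)
          = score (cur ++ [c]) := by
        simp [score, chVal]
      rw [hs]
      have := ih bw bs (cur ++ [c])
      simpa using this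

lemma chVal_nonneg (c : Char) : 0 ≤ chVal c := by
  unfold chVal
  split_ifs with h
  · have hlo : 97 ≤ c.toNat := UInt32.le_iff_toNat_le.mp (Char.le_def.mp h.1)
    omega
  · omega

lemma score_nonneg (cs : List Char) : 0 ≤ score cs := by
  induction cs with
  | nil => simp [score]
  | cons c t ih =>
    have := chVal_nonneg c
    simp only [score, List.map_cons, List.sum_cons] at *
    omega

lemma chooseSt_amax (ws : List (List Char)) : ∀ (bw : Option String) (bs : Int),
    (chooseSt (bw, bs) ws).1
    = (amax score ws).elim bw (fun m => if bs < score m then some (String.ofList m) else bw) := by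
  induction ws with
  | nil => intro bw bs; rfl
  | cons w t ih =>
    intro bw bs
    have hstep : chooseSt (bw, bs) (w :: t)
        = chooseSt (if bs < score w then (some (String.ofList w), score w) else (bw, bs)) t := by
      simp only [chooseSt, List.foldl_cons]
    rw [hstep]
    rcases ht : amax score t with _ | m
    · have htn : t = [] := (amax_eq_none_iff _ _).1 ht
      subst htn
      simp only [amax, Option.elim, chooseSt, List.foldl_nil]
      split_ifs <;> rfl
    · have h1 := ih (some (String.ofList w)) (score w)
      have h2 := ih bw bs
      rw [ht] at h1 h2
      simp only [Option.elim] at h1 h2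
      simp only [amax, ht, Option.elim]
      by_cases hwm : score w < score m
      · rw [if_pos hwm]
        by_cases hbw : bs < score w
        · rw [if_pos hbw, h1, if_pos hwm, if_pos (show bs < score m by omega)]
        · rw [if_neg hbw, h2]
      · rw [if_neg hwm]
        by_cases hbw : bs < score w
        · rw [if_pos hbw, h1, if_neg hwm, if_pos hbw]
        · rw [if_neg hbw, h2, if_neg (show ¬ bs < score m by omega), if_neg hbw]

lemma highB_char (x : String) :
    high_alt x = ((amax score (PySem.Chars.split₀ x.toList)).map String.ofList).getD "" := by
  have hfg := fold_go x.toList none (-1) []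
  rw [show score [] = 0 from rfl] at hfg
  simp only [List.reverse_nil] at hfg
  unfold high_alt
  rcases hst : x.toList.foldl bStep (none, -1, [], 0) with ⟨bw, bs, cur, cs⟩
  rw [hst] at hfg
  have hfin : (if ¬ cur.isEmpty ∧ bs < cs then some (String.ofList cur) else bw)
      = finish (bw, bs, cur, cs) := rfl
  simp only []
  rw [hfin, hfg, chooseSt_amax]
  unfold PySem.Chars.split₀
  rcases amax score (PySem.Chars.split₀.go x.toList [] []) with _ | m
  · rfl
  · simp only [Option.elim, Option.map_some, Option.getD_some]
    rw [if_pos (by have := score_nonneg m; omega)]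
    rfl

-- ===== VERDICT =====
theorem high_spec : Claim_equal_high := by
  intro x _ hpre
  unfold Spec_high
  rcases hws : PySem.Str.split₀ x with _ | ⟨w, t⟩
  · exact absurd hws hpre
  rw [highA_char x w t hws, highB_char x]
  have hsplit : PySem.Str.split₀ x = (PySem.Chars.split₀ x.toList).map String.ofList := rfl
  rw [← hws, hsplit, amax_map']
  have hsc : (fun w => scoreS (String.ofList w)) = score := by
    funext w
    simp [scoreS, score]
  rw [hsc]
  rcases amax score (PySem.Chars.split₀ x.toList) with _ | m <;> simp
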